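-- pv_equiv track=rewrite | github.com/lattiq/leda | leda/utils/plot_utils.py | _extend_palette
-- ===== SOURCE A (Python) =====
-- from typing import List, Dict, Any, Optional, Tuple
--
-- def _extend_palette(base_palette: List[str], n_colors: int) -> List[str]:
--     """Extend a color palette to the required number of colors."""
--     import colorsys
--
--     extended_palette = base_palette.copy()
--
--     while len(extended_palette) < n_colors:
--         # Generate intermediate colors
--         for i in range(len(base_palette) - 1):
--             if len(extended_palette) >= n_colors:
--                 break
--
--             color1 = base_palette[i]
--             color2 = base_palette[i + 1]
--             intermediate = _interpolate_colors(color1, color2, 0.5)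
--             extended_palette.append(intermediate)
--
--     return extended_palette[:n_colors]
--
-- def _interpolate_colors(color1: str, color2: str, t: float) -> str:
--     """Interpolate between two hex colors."""
--     # Convert hex to RGB
--     r1, g1, b1 = _hex_to_rgb(color1)
--     r2, g2, b2 = _hex_to_rgb(color2)
--
--     # Interpolate
--     r = int(r1 + (r2 - r1) * t)
--     g = int(g1 + (g2 - g1) * t)
--     b = int(b1 + (b2 - b1) * t)
--
--     # Convert back to hex
--     return f"#{r:02x}{g:02x}{b:02x}"
--
-- def _hex_to_rgb(hex_color: str) -> Tuple[int, int, int]: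
--     """Convert hex color to RGB tuple."""
--     hex_color = hex_color.lstrip('#')
--     return tuple(int(hex_color[i:i+2], 16) for i in (0, 2, 4))
-- ===== SOURCE B (Python) =====
-- def _rgb(color):
--     """Strictly parse '#rrggbb' (leading '#'s optional) into an RGB list."""
--     s = color.lstrip('#')
--     hexdigits = '0123456789abcdefABCDEF'
--     vals = []
--     for i in (0, 2, 4):
--         pair = s[i:i + 2]
--         if len(pair) != 2 or pair[0] not in hexdigits or pair[1] not in hexdigits:
--             raise ValueError('invalid hex color: %r' % (color,))
--         vals.append(int(pair, 16))
--     return vals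
--
-- def _mid(color1, color2):
--     """Exact midpoint of two hex colors (matches interpolation at t=0.5)."""
--     a = _rgb(color1)
--     b = _rgb(color2)
--     return '#%02x%02x%02x' % tuple((x + y) // 2 for x, y in zip(a, b))
--
-- def _extend_palette(base_palette, n_colors):
--     """Extend a color palette to the required number of colors."""
--     if n_colors <= len(base_palette):
--         return base_palette[:n_colors]
--     mids = [_mid(base_palette[i], base_palette[i + 1])
--             for i in range(len(base_palette) - 1)]
--     need = n_colors - len(base_palette)
--     reps = -(-need // len(mids))          # ceil(need / len(mids))
--     return base_palette + (mids * reps)[:need]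
-- ===== Notes on version B (the rewrite author's own statement) =====
-- stated objective: simpler
-- what changed: B replaces A's nested while/for loop that re-parses and re-interpolates adjacent colors on every pass with a one-shot computation: the fixed midpoint list is built once, and the extension is that list replicated ceil(need/len) times and truncated, using exact integer midpoints (x+y)//2 instead of float interpolation at t=0.5.
-- outside the precondition, e.g. on _extend_palette(['#+10203', '#010203'], 3): A returns ['#+10203', '#010203', '#010203'], B raises ValueError
import Mathlib
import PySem

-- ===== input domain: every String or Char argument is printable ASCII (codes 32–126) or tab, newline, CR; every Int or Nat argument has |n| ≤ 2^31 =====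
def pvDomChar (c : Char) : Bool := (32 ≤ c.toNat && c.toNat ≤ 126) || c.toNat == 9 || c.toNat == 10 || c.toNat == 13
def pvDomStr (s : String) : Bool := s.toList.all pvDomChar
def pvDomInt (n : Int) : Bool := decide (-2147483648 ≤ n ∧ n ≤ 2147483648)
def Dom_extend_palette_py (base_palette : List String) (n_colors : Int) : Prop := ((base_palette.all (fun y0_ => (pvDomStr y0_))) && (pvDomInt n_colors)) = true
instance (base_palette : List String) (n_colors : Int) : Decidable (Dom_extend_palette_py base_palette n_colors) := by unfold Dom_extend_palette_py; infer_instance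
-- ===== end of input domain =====

-- B computes the fixed list of adjacent midpoints once and builds the extension by list
-- replication + truncation, replacing A's re-interpolating while/for loop (objective: simpler).


-- shared low-level numeric helpers (both Pythons use int(pair, 16) on a 2-char hex string and
-- "%02x"/f"{:02x}" formatting; exact on strict 2-hex-digit pairs and 0 ≤ n ≤ 255 — Pre_'s domain;
-- on other inputs Python raises ValueError and Pre_ excludes them)
def pvHexVal (c : Char) : Int :=
  if '0' ≤ c ∧ c ≤ '9' then (c.toNat : Int) - 48
  else if 'a' ≤ c ∧ c ≤ 'f' then (c.toNat : Int) - 87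
  else if 'A' ≤ c ∧ c ≤ 'F' then (c.toNat : Int) - 55
  else 0
def pvPairVal (s : List Char) (i : Nat) : Int :=
  16 * pvHexVal (s.getD i '0') + pvHexVal (s.getD (i + 1) '0')
def pvHexChar (d : Nat) : Char := if d < 10 then Char.ofNat (48 + d) else Char.ofNat (87 + d)
def pvToHex2 (n : Int) : List Char := [pvHexChar (n.toNat / 16), pvHexChar (n.toNat % 16)]

-- ===== PORT A =====
-- _hex_to_rgb: hex_color.lstrip('#'), then int(hex_color[i:i+2],16) for i in (0,2,4)
def pvHexToRgb (c : String) : Int × Int × Int :=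
  let s := c.toList.dropWhile (· = '#')
  (pvPairVal s 0, pvPairVal s 2, pvPairVal s 4)
-- _interpolate_colors, specialised to its only call site t = 0.5:
-- int(r1 + (r2-r1)*0.5) is float-exact for r1,r2 in [0,255] and equals r1 + (r2-r1)//2
def pvInterpolate (c1 c2 : String) : String :=
  let (r1, g1, b1) := pvHexToRgb c1
  let (r2, g2, b2) := pvHexToRgb c2
  let r := r1 + PySem.Int.floordiv (r2 - r1) 2
  let g := g1 + PySem.Int.floordiv (g2 - g1) 2
  let b := b1 + PySem.Int.floordiv (b2 - b1) 2
  String.ofList ('#' :: (pvToHex2 r ++ pvToHex2 g ++ pvToHex2 b))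
-- inner 'for i in range(len(base_palette)-1)' with its break; bp[i] is in range for these i,
-- so pyGetD is exact
def pvForA (bp : List String) (n : Int) : List Int → List String → List String
  | [], s => s
  | i :: rest, s =>
      if n ≤ (s.length : Int) then s
      else pvForA bp n rest
        (s ++ [pvInterpolate (PySem.List.pyGetD bp i "") (PySem.List.pyGetD bp (i + 1) "")])
-- outer 'while len(extended_palette) < n_colors'; fuel only makes the loop total: inside Pre_
-- every pass appends at least one color, so fuel n.toNat + 1 is never exhausted (outside Pre_
-- Python loops forever)
def pvWhileA (bp : List String) (n : Int) : Nat → List String → List String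
  | 0, s => s
  | fuel + 1, s =>
      if (s.length : Int) < n then
        pvWhileA bp n fuel (pvForA bp n (PySem.List.pyRange 0 ((bp.length : Int) - 1) 1) s)
      else s
def extend_palette_py (base_palette : List String) (n_colors : Int) : List String :=
  PySem.List.slice (pvWhileA base_palette n_colors (n_colors.toNat + 1) base_palette)
    none (some n_colors)

-- ===== PORT B =====
-- _rgb: strict parse of s[i:i+2] for i in (0,2,4) (its explicit hex-digit check raises
-- ValueError outside Pre_; exact inside)
def pvRgbB (c : String) : List Int :=
  let s := c.toList.dropWhile (· = '#')
  [0, 2, 4].map (fun i => pvPairVal s i)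
-- _mid: componentwise (x+y)//2, formatted '#%02x%02x%02x'
def pvMid (c1 c2 : String) : String :=
  String.ofList ('#' ::
    (List.zipWith (fun x y => PySem.Int.floordiv (x + y) 2) (pvRgbB c1) (pvRgbB c2)).flatMap
      pvToHex2)
def extend_palette_py_alt (base_palette : List String) (n_colors : Int) : List String :=
  if n_colors ≤ (base_palette.length : Int) then
    PySem.List.slice base_palette none (some n_colors)
  else
    let mids := (PySem.List.pyRange 0 ((base_palette.length : Int) - 1) 1).map
      (fun i => pvMid (PySem.List.pyGetD base_palette i "") (PySem.List.pyGetD base_palette (i + 1) ""))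
    let need := n_colors - (base_palette.length : Int)
    let reps := -(PySem.Int.floordiv (-need) (mids.length : Int))
    -- mids * reps is replicate (reps.toNat) mids flattened (Python's list*k is [] for k ≤ 0)
    base_palette ++ PySem.List.slice (List.replicate reps.toNat mids).flatten none (some need)

-- ===== PRECONDITION & SPEC =====
-- a color is '#'*-prefixed text whose first six remaining chars are plain hex digits
def pvValidHex (c : String) : Bool :=
  let s := c.toList.dropWhile (· = '#')
  decide (6 ≤ s.length) &&
    (s.take 6).all (fun ch => ch.isDigit || ('a' ≤ ch && ch ≤ 'f') || ('A' ≤ ch && ch ≤ 'F'))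
-- Pre_ excludes (a) palettes with fewer than 2 colors when n_colors asks for more — Python A
-- loops forever there — and (b) colors outside strict '#rrggbb' form when midpoints are needed:
-- A raises ValueError on short/non-hex colors, and on the remaining lenient forms int(_,16)
-- happens to accept (signs, inner whitespace) A's acceptance is an accident of int(); B raises.
def Pre_extend_palette_py (base_palette : List String) (n_colors : Int) : Prop :=
  n_colors ≤ (base_palette.length : Int) ∨
    (2 ≤ base_palette.length ∧ ∀ c ∈ base_palette, pvValidHex c = true)
instance (base_palette : List String) (n_colors : Int) :
    Decidable (Pre_extend_palette_py base_palette n_colors) := by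
  unfold Pre_extend_palette_py; infer_instance
def pvWitness_extend_palette_py : List String × Int := (["#010203", "#050607"], 4)
def Spec_extend_palette_py (base_palette : List String) (n_colors : Int) (out : List String) : Prop := out = extend_palette_py_alt base_palette n_colors
instance (base_palette : List String) (n_colors : Int) (out : List String) : Decidable (Spec_extend_palette_py base_palette n_colors out) := by unfold Spec_extend_palette_py; infer_instance

-- ===== CLAIM (what is proved, stated in full; the proofs are below) =====
def Claim_equal_extend_palette_py : Prop := ∀ (base_palette : List String) (n_colors : Int), Dom_extend_palette_py base_palette n_colors → Pre_extend_palette_py base_palette n_colors → Spec_extend_palette_py base_palette n_colors (extend_palette_py base_palette n_colors)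

-- ===== LEMMAS AND PROOFS =====
theorem pv_fdiv_mid (a b : Int) :
    a + PySem.Int.floordiv (b - a) 2 = PySem.Int.floordiv (a + b) 2 := by
  rw [PySem.Int.floordiv_eq_ediv_of_pos (by omega : (0:Int) < 2),
      PySem.Int.floordiv_eq_ediv_of_pos (by omega : (0:Int) < 2)]
  omega

theorem pv_interpolate_eq_mid (c1 c2 : String) : pvInterpolate c1 c2 = pvMid c1 c2 := by
  simp only [pvInterpolate, pvMid, pvHexToRgb, pvRgbB, List.map, List.zipWith, List.flatMap, pv_fdiv_mid]
  rfl

theorem pv_forA_eq (bp : List String) (n : Int) (f : Int → String)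
    (hf : ∀ i, f i = pvInterpolate (PySem.List.pyGetD bp i "") (PySem.List.pyGetD bp (i + 1) ""))
    (idxs : List Int) : ∀ s : List String,
    pvForA bp n idxs s = s ++ (idxs.map f).take ((n - s.length).toNat) := by
  induction idxs with
  | nil => intro s; simp [pvForA]
  | cons i rest ih =>
    intro s
    rw [pvForA]
    by_cases h : n ≤ (s.length : Int)
    · rw [if_pos h]
      have h0 : (n - (s.length : Int)).toNat = 0 := by omega
      simp [h0]
    · rw [if_neg h, ← hf i, ih]
      have hlen : (((s ++ [f i]).length : Nat) : Int) = (s.length : Int) + 1 := by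
        simp
      rw [hlen]
      have h2 : (n - (s.length : Int)).toNat = (n - ((s.length : Int) + 1)).toNat + 1 := by
        omega
      rw [List.map_cons, h2, List.take_succ_cons, List.append_assoc]
      rfl

theorem pv_whileA_eq (bp : List String) (n : Int) (M : List String)
    (hM : M ≠ [])
    (hMids : ∀ s : List String, pvForA bp n (PySem.List.pyRange 0 ((bp.length : Int) - 1) 1) s
      = s ++ M.take ((n - s.length).toNat)) :
    ∀ (fuel : Nat) (s : List String), (n - s.length).toNat ≤ fuel →
    pvWhileA bp n fuel s = s ++ (List.replicate fuel M).flatten.take ((n - s.length).toNat) := by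
  intro fuel
  induction fuel with
  | zero =>
    intro s hs
    have h0 : (n - (s.length : Int)).toNat = 0 := by omega
    simp [pvWhileA, h0]
  | succ fuel ih =>
    intro s hs
    rw [pvWhileA]
    by_cases hlt : (s.length : Int) < n
    · rw [if_pos hlt, hMids s, ih]
      · have hM1 : 1 ≤ M.length := by
          cases M with
          | nil => exact absurd rfl hM
          | cons a t => simp
        have hlen : (((s ++ M.take ((n - s.length).toNat)).length : Nat) : Int)
            = (s.length : Int) + min (n - s.length).toNat M.length := by
          simp [List.length_take]
        rw [hlen]
        have hr1 : 1 ≤ (n - (s.length : Int)).toNat := by omega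
        have hkey : (n - ((s.length : Int) + (min (n - s.length).toNat M.length : Nat))).toNat
            = (n - s.length).toNat - min (n - s.length).toNat M.length := by
          omega
        rw [hkey]
        have hrep : (List.replicate (fuel + 1) M).flatten = M ++ (List.replicate fuel M).flatten := by
          rw [List.replicate_succ, List.flatten_cons]
        rw [hrep, List.take_append, List.append_assoc]
        have hmin : (n - (s.length : Int)).toNat - min (n - s.length).toNat M.length
            = (n - s.length).toNat - M.length := by omega
        rw [hmin]
      · have hM1 : 1 ≤ M.length := by
          cases M with
          | nil => exact absurd rfl hM
          | cons a t => simp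
        have hlen : (((s ++ M.take ((n - s.length).toNat)).length : Nat) : Int)
            = (s.length : Int) + min (n - s.length).toNat M.length := by
          simp [List.length_take]
        rw [hlen]
        omega
    · rw [if_neg hlt]
      have h0 : (n - (s.length : Int)).toNat = 0 := by omega
      simp [h0]

theorem pv_take_flatten_replicate {α : Type} (xs : List α) (m : Nat) (k : Nat)
    (hk : m ≤ k * xs.length) :
    ∀ j : Nat, (List.replicate (k + j) xs).flatten.take m = (List.replicate k xs).flatten.take m := by
  intro j
  induction j with
  | zero => rfl
  | succ j ih =>
    have hrep : List.replicate (k + (j + 1)) xs = List.replicate (k + j) xs ++ [xs] := by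
      rw [show k + (j + 1) = (k + j) + 1 by omega, List.replicate_succ' ]
    have hlen : (List.replicate (k + j) xs).flatten.length = (k + j) * xs.length := by
      simp [List.length_flatten]
    rw [hrep, List.flatten_append, List.take_append_of_le_length, ih]
    rw [hlen]
    calc m ≤ k * xs.length := hk
      _ ≤ (k + j) * xs.length := Nat.mul_le_mul_right _ (by omega)

theorem pv_take_flatten_replicate2 {α : Type} (xs : List α) (m k₁ k₂ : Nat)
    (h1 : m ≤ k₁ * xs.length) (h2 : m ≤ k₂ * xs.length) :
    (List.replicate k₁ xs).flatten.take m = (List.replicate k₂ xs).flatten.take m := by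
  rcases Nat.le_total k₁ k₂ with h | h
  · rw [show k₂ = k₁ + (k₂ - k₁) by omega, pv_take_flatten_replicate xs m k₁ h1]
  · rw [show k₁ = k₂ + (k₁ - k₂) by omega, pv_take_flatten_replicate xs m k₂ h2]

-- ===== VERDICT (by name: the statement is the Claim_ definition above) =====
theorem extend_palette_py_spec : Claim_equal_extend_palette_py := by
  intro bp n _ hpre
  unfold Spec_extend_palette_py extend_palette_py extend_palette_py_alt
  by_cases hle : n ≤ (bp.length : Int)
  · rw [pvWhileA, if_neg (by omega), if_pos hle]
  · have hbp2 : 2 ≤ bp.length := by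
      rcases hpre with h | ⟨h, _⟩
      · omega
      · exact h
    rw [if_neg hle]
    set f : Int → String :=
      fun i => pvMid (PySem.List.pyGetD bp i "") (PySem.List.pyGetD bp (i + 1) "") with hfdef
    set M : List String :=
      (PySem.List.pyRange 0 ((bp.length : Int) - 1) 1).map f with hMdef
    have hf : ∀ i, f i = pvInterpolate (PySem.List.pyGetD bp i "") (PySem.List.pyGetD bp (i + 1) "") := by
      intro i; rw [hfdef, pv_interpolate_eq_mid]
    have hMlen : M.length = bp.length - 1 := by
      rw [hMdef, List.length_map, PySem.List.length_pyRange_one]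
      omega
    have hMne : M ≠ [] := by
      intro h
      rw [h] at hMlen
      simp at hMlen
      omega
    have hMids : ∀ s : List String, pvForA bp n (PySem.List.pyRange 0 ((bp.length : Int) - 1) 1) s
        = s ++ M.take ((n - s.length).toNat) := by
      intro s
      rw [pv_forA_eq bp n f hf, hMdef]
    set r : Nat := (n - (bp.length : Int)).toNat with hrdef
    have hr' : (r : Int) = n - (bp.length : Int) := by omega
    have hwhile := pv_whileA_eq bp n M hMne hMids (n.toNat + 1) bp (by omega)
    rw [hwhile, PySem.List.slice_to _ (by omega : (0:Int) ≤ n)]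
    show _ = bp ++ PySem.List.slice
        (List.replicate (-(PySem.Int.floordiv (-(n - (bp.length : Int))) ((M.length : Nat) : Int))).toNat M).flatten
        none (some (n - (bp.length : Int)))
    rw [PySem.List.slice_to _ (by omega : (0:Int) ≤ n - (bp.length : Int))]
    -- both sides are bp ++ (a truncated flattening of replicated M)
    have hM1 : 1 ≤ M.length := by omega
    have hbound1 : r ≤ (n.toNat + 1) * M.length := by
      calc r ≤ n.toNat + 1 := by omega
        _ = (n.toNat + 1) * 1 := by omega
        _ ≤ (n.toNat + 1) * M.length := Nat.mul_le_mul_left _ hM1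
    -- the ceiling: need ≤ reps * len(mids)
    set L : Int := (M.length : Int) with hLdef
    set q : Int := PySem.Int.floordiv (-(n - (bp.length : Int))) L with hqdef
    have hL0 : 0 < L := by rw [hLdef]; exact_mod_cast hM1
    have hdm := PySem.Int.floordiv_mul_add_mod (-(n - (bp.length : Int))) L
    have hm0 := PySem.Int.mod_nonneg (-(n - (bp.length : Int))) hL0
    rw [← hqdef] at hdm
    have hceil : n - (bp.length : Int) ≤ -q * L := by nlinarith
    have hq0 : 0 ≤ -q := by nlinarith
    have hbound2 : r ≤ (-q).toNat * M.length := by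
      have hcast : (((-q).toNat * M.length : Nat) : Int) = -q * L := by
        push_cast [Int.toNat_of_nonneg hq0, hLdef]
        ring
      rw [hLdef] at hceil
      have h1 : (r : Int) ≤ (((-q).toNat * M.length : Nat) : Int) := by
        rw [hcast, hr']; exact hceil
      exact_mod_cast h1
    have hfinal := pv_take_flatten_replicate2 M r (n.toNat + 1) (-q).toNat hbound1 hbound2
    have hrtn : (n - (bp.length : Int)).toNat = r := rfl
    rw [hrtn, List.take_append, List.take_of_length_le (by omega),
        show n.toNat - bp.length = r by omega, List.take_take, Nat.min_self, hfinal]
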